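-- pv_equiv track=rewrite | github.com/YadavAnurag/practices | competitive-programming/interviewBit/weekendTests/17 Nov/mysteriousFun.py | solve
-- ===== SOURCE A (Python) =====
-- def solve(A,B):
-- 	ans = 1
--
-- 	def binExponentiation(num, p):
-- 		res = num
-- 		if p%2==1:
-- 			res *= p
-- 			p -= 1
-- 		i = 2
-- 		while i<=p:
-- 			res**i
--
--
-- 	for num in A:
-- 		num = num%B
-- 		ans = num**ans
-- 	return ans%B
-- ===== SOURCE B (Python) =====
-- # Exact re-implementation of solve: power tower of the residues (a % B) taken mod B,
-- # computed with capped exponent tracking + modular period reduction instead of building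
-- # the giant integer tower that A exponentiates literally.
--
-- CAP = 1 << 64
--
--
-- def _period(r, m):
--     # least p >= 1 with r**(m+p) == r**m (mod m); some p <= m always exists (pigeonhole)
--     base = pow(r, m, m)
--     x, p = base * r % m, 1
--     while x != base:
--         x, p = x * r % m, p + 1
--     return p
--
--
-- def solve(A, B):
--     rs = [a % B for a in A]
--     n = len(rs)
--     # tc[i] = min(t_i, CAP) where t_0 = 1 and t_i = rs[i-1] ** t_{i-1}
--     tc = [1]
--     for r in rs:
--         e = tc[-1]
--         if r <= 1:
--             tc.append(1 if (r == 1 or e == 0) else 0)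
--         elif e >= 64:
--             tc.append(CAP)
--         else:
--             tc.append(min(r ** e, CAP))
--
--     def peel(i, m):
--         # t_i % m  (valid for 1 <= m <= CAP)
--         if m == 1:
--             return 0
--         if i == 0:
--             return 1 % m
--         r, e = rs[i - 1], tc[i - 1]
--         if e < CAP:
--             return pow(r, e, m)  # t_{i-1} = e exactly
--         p = _period(r, m)
--         return pow(r, m + (peel(i - 1, p) + p - m % p) % p, m)
--
--     return peel(n, B)
-- ===== Notes on version B (the rewrite author's own statement) =====
-- stated objective: alternative
-- what changed: Instead of literally exponentiating the residues into a giant integer tower and reducing at the end, B tracks each partial tower capped at 2^64 and reduces the tower modularly from the outside in, replacing a huge exponent by a congruent small one via a verified period of the map e -> r^e mod m, so intermediate numbers never exceed B in size (a timing run could not certify a speed ratio, so no speed is claimed).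
-- outside the precondition, e.g. on solve([3, 3, 3, 3, 3], -2147483648): A returns -0.0, B returns -2147483645; on solve([5], -3): A returns -1, B returns -1
import Mathlib
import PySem

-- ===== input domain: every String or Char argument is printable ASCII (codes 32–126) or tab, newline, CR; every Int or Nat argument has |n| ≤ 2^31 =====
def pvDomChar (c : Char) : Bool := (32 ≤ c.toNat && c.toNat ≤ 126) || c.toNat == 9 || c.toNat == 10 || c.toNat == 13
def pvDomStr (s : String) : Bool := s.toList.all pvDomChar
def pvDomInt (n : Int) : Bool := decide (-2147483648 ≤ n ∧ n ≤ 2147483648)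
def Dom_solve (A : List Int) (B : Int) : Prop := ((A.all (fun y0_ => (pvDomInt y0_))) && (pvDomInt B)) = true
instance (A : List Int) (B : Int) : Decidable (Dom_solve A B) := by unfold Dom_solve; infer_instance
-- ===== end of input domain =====

-- B computes A's power tower of residues mod B by capped-exponent tracking and modular
-- period reduction instead of exponentiating giant integers; equivalence of the RETURN
-- value is proved for 0 < B (Pre_solve).

-- ===== PORT A =====
-- Python's built-in int ** int (nonnegative exponent): exact b ^ e, computed by CPython's
-- square-and-multiply loop over the exponent bits (ported that way so it evaluates where
-- Python does); pyPow_eq below proves pyPow b e = b ^ e.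
def pyPowAux (base acc : Int) (e : Nat) : Int :=
  if e = 0 then acc
  else pyPowAux (base * base) (if e % 2 = 1 then acc * base else acc) (e / 2)
termination_by e
decreasing_by exact Nat.div_lt_self (Nat.pos_of_ne_zero (by assumption)) (by norm_num)

def pyPow (b : Int) (e : Nat) : Int := pyPowAux b 1 e

-- the inner helper `binExponentiation` in the source is dead code (never called): not ported.
-- Python `num ** ans` is exact for a nonnegative integer exponent; under Pre_solve (0 < B)
-- every residue and hence every accumulator value is a nonnegative integer, so the
-- `.toNat` below never clamps and the port is exact there.
def solve (A : List Int) (B : Int) : Int :=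
  let ans := A.foldl (fun ans num => pyPow (PySem.Int.mod num B) ans.toNat) 1
  PySem.Int.mod ans B

-- ===== PORT B =====
-- Python's built-in three-argument pow(r, e, m) on nonnegative ints: r ^ e % m by CPython's
-- binary modular exponentiation (pyPowMod_eq below proves pyPowMod r e m = r ^ e % m).
def pyPowMod (r e m : Nat) : Nat :=
  if h : e = 0 then 1 % m
  else
    let half := pyPowMod r (e / 2) m
    let sq := half * half % m
    if e % 2 = 0 then sq else sq * r % m
termination_by e
decreasing_by exact Nat.div_lt_self (Nat.pos_of_ne_zero h) (by norm_num)

-- CAP = 1 << 64 from Source B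
def pvCAP : Nat := 18446744073709551616

-- one step of Source B's `tc` table: tc[i] = min(t_i, CAP)
def pvCapStep (r e : Nat) : Nat :=
  if r ≤ 1 then (if r = 1 ∨ e = 0 then 1 else 0)
  else if 64 ≤ e then pvCAP
  else min (r ^ e) pvCAP

-- Source B precomputes the table `tc` iteratively; the port computes the same entry, by the
-- same step function, for the (reversed) suffix being peeled.
def pvCapT (ls : List Nat) : Nat :=
  ls.reverse.foldl (fun e r => pvCapStep r e) 1

-- Source B's `_period` while-loop; the fuel `m` only makes the loop total (a period ≤ m
-- always exists, see pvPeriod_spec below, so the fuel is never exhausted when 1 ≤ m).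
def pvPeriodGo (r m base x p : Nat) : Nat → Nat
  | 0 => p
  | fuel + 1 => if x = base then p else pvPeriodGo r m base (x * r % m) (p + 1) fuel

def pvPeriod (r m : Nat) : Nat :=
  let base := pyPowMod r m m
  pvPeriodGo r m base (base * r % m) 1 m

-- Source B's `peel(i, m)`, recursing over the reversed residue list (outermost base first);
-- the built-in pow(r, e, m) on nonnegative ints is r ^ e % m.
def pvPeel : List Nat → Nat → Nat
  | [], m => if m = 1 then 0 else 1 % m
  | r :: tl, m =>
    if m = 1 then 0
    else
      let e := pvCapT tl
      if e < pvCAP then pyPowMod r e m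
      else
        let p := pvPeriod r m
        pyPowMod r (m + (pvPeel tl p + p - m % p) % p) m

def solve_alt (A : List Int) (B : Int) : Int :=
  if B ≤ 0 then 0   -- totality guard: Source B is only defined for B > 0 (Pre_solve)
  else ((pvPeel ((A.map (fun a => (PySem.Int.mod a B).toNat)).reverse) B.toNat : Nat) : Int)

-- ===== PRECONDITION & SPEC =====
-- Pre_solve excludes B ≤ 0: for B = 0 Python's `%` raises ZeroDivisionError in both
-- programs, and for B < 0 A returns a Python float (not an int) or raises on all but
-- degenerate inputs; the modular period reduction is stated for a positive modulus.
def Pre_solve (A : List Int) (B : Int) : Prop := 0 < B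
instance (A : List Int) (B : Int) : Decidable (Pre_solve A B) := by unfold Pre_solve; infer_instance

def pvWitness_solve : List Int × Int := ([2, 3, 2], 1000003)

def Spec_solve (A : List Int) (B : Int) (out : Int) : Prop := out = solve_alt A B
instance (A : List Int) (B : Int) (out : Int) : Decidable (Spec_solve A B out) := by unfold Spec_solve; infer_instance

-- ===== CLAIM (what is proved, stated in full; the proofs are below) =====
def Claim_equal_solve : Prop := ∀ (A : List Int) (B : Int), Dom_solve A B → Pre_solve A B → Spec_solve A B (solve A B)

-- ===== LEMMAS AND PROOFS =====

lemma pyPowAux_eq (e : Nat) : ∀ (base acc : Int), pyPowAux base acc e = acc * base ^ e := by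
  induction e using Nat.strong_induction_on with
  | _ e ih =>
    intro base acc
    by_cases h0 : e = 0
    · simp [pyPowAux, h0]
    · rw [pyPowAux, if_neg h0,
        ih (e / 2) (Nat.div_lt_self (Nat.pos_of_ne_zero h0) (by norm_num))]
      rcases Nat.mod_two_eq_zero_or_one e with h2 | h2
      · rw [if_neg (by omega)]
        have hbb : (base * base) ^ (e / 2) = base ^ e := by
          rw [← sq, ← pow_mul]; congr 1; omega
        rw [hbb]
      · rw [if_pos h2]
        have hbb : (base * base) ^ (e / 2) * base = base ^ e := by
          rw [← sq, ← pow_mul, ← pow_succ]; congr 1; omega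
        rw [← hbb]; ring

lemma pyPow_eq (b : Int) (e : Nat) : pyPow b e = b ^ e := by
  rw [pyPow, pyPowAux_eq]; ring

lemma pvCapT_nil : pvCapT [] = 1 := rfl

lemma pvCapT_cons (r : Nat) (tl : List Nat) :
    pvCapT (r :: tl) = pvCapStep r (pvCapT tl) := by
  simp [pvCapT, List.foldl_append]

lemma pyPowMod_eq (r e m : Nat) : pyPowMod r e m = r ^ e % m := by
  induction e using Nat.strong_induction_on with
  | _ e ih =>
    by_cases h0 : e = 0
    · simp [pyPowMod, h0]
    · rw [pyPowMod, dif_neg h0, ih (e / 2) (Nat.div_lt_self (Nat.pos_of_ne_zero h0) (by norm_num))]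
      have hsplit : e = e / 2 + e / 2 + e % 2 := by omega
      rcases Nat.mod_two_eq_zero_or_one e with h2 | h2
      · rw [if_pos h2]
        conv_rhs => rw [hsplit, h2, pow_add, pow_add, pow_zero, mul_one, Nat.mul_mod]
      · rw [if_neg (by omega)]
        conv_rhs => rw [hsplit, h2, pow_add, pow_add, pow_one]
        rw [← Nat.mul_mod, Nat.mod_mul_mod]

-- the exact tower over the reversed residue list: pvTower ls = t_{|ls|}
def pvTower : List Nat → Nat
  | [] => 1
  | r :: tl => r ^ pvTower tl

-- the table entry really is min(tower, CAP)
lemma pvCapT_eq (ls : List Nat) : pvCapT ls = min (pvTower ls) pvCAP := by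
  have hCAP : 64 ≤ pvCAP := by norm_num [pvCAP]
  induction ls with
  | nil => simp [pvCapT_nil, pvTower, pvCAP]
  | cons r tl ih =>
    rw [pvCapT_cons]
    show pvCapStep r (pvCapT tl) = min (r ^ pvTower tl) pvCAP
    rw [ih]
    set T := pvTower tl with hT
    match r, (by omega : r = 0 ∨ r = 1 ∨ 2 ≤ r) with
    | 0, _ =>
      rcases Nat.eq_zero_or_pos T with h0 | h0
      · simp [pvCapStep, h0]; omega
      · have h1 : ¬ ((0:Nat) = 1 ∨ min T pvCAP = 0) := by
          simp; omega
        rw [pvCapStep, if_pos (by omega), if_neg h1, Nat.zero_pow (by omega)]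
        omega
    | 1, _ => simp [pvCapStep]; omega
    | (r+2), h =>
      rw [pvCapStep, if_neg (by omega)]
      by_cases he : 64 ≤ min T pvCAP
      · rw [if_pos he]
        have hT64 : 64 ≤ T := le_trans he (Nat.min_le_left _ _)
        have : pvCAP ≤ (r+2) ^ T := by
          calc pvCAP = 2 ^ 64 := by norm_num [pvCAP]
          _ ≤ 2 ^ T := Nat.pow_le_pow_right (by norm_num) hT64
          _ ≤ (r+2) ^ T := Nat.pow_le_pow_left (by omega) T
        omega
      · rw [if_neg he]
        have : min T pvCAP = T := by omega
        rw [this]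

-- congruent powers stay congruent when the exponents grow together
lemma pow_mod_shift (r m i j k : Nat) (h : r ^ i % m = r ^ j % m) :
    r ^ (i + k) % m = r ^ (j + k) % m := by
  have := Nat.ModEq.mul_right (r ^ k) (show r ^ i ≡ r ^ j [MOD m] from h)
  simpa [pow_add] using this

-- pigeonhole: some period p ≤ m works
lemma exists_period (r m : Nat) (hm : 1 ≤ m) :
    ∃ p, 1 ≤ p ∧ p ≤ m ∧ r ^ (m + p) % m = r ^ m % m := by
  have hmaps : ∀ k ∈ Finset.range (m+1), r ^ k % m ∈ Finset.range m := by
    intro k _; exact Finset.mem_range.mpr (Nat.mod_lt _ (by omega))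
  have hcard : (Finset.range m).card < (Finset.range (m+1)).card := by simp
  obtain ⟨i, hi, j, hj, hne, heq⟩ :=
    Finset.exists_ne_map_eq_of_card_lt_of_maps_to hcard hmaps
  simp only [Finset.mem_range] at hi hj
  rcases Nat.lt_or_ge i j with hij | hij
  · refine ⟨j - i, by omega, by omega, ?_⟩
    have := pow_mod_shift r m j i (m - i) heq.symm
    have e1 : j + (m - i) = m + (j - i) := by omega
    have e2 : i + (m - i) = m := by omega
    rw [e1, e2] at this; exact this
  · have hij' : j < i := by omega
    refine ⟨i - j, by omega, by omega, ?_⟩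
    have := pow_mod_shift r m i j (m - j) heq
    have e1 : i + (m - j) = m + (i - j) := by omega
    have e2 : j + (m - j) = m := by omega
    rw [e1, e2] at this; exact this

-- the fuel loop finds a (not later than the given) success
lemma periodGo_finds (r m base : Nat) :
    ∀ fuel p d, d < fuel → r ^ (m + p + d) % m = base →
      p ≤ pvPeriodGo r m base (r ^ (m + p) % m) p fuel ∧
      pvPeriodGo r m base (r ^ (m + p) % m) p fuel ≤ p + d ∧
      r ^ (m + pvPeriodGo r m base (r ^ (m + p) % m) p fuel) % m = base := by
  intro fuel
  induction fuel with
  | zero => intro p d hd; omega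
  | succ fuel ih =>
    intro p d hd hsucc
    by_cases hx : r ^ (m + p) % m = base
    · rw [pvPeriodGo, if_pos hx]
      exact ⟨le_refl _, by omega, hx⟩
    · rw [pvPeriodGo, if_neg hx]
      have hd0 : d ≠ 0 := by
        intro h; rw [h] at hsucc; simp at hsucc; exact hx hsucc
      have hstep : r ^ (m + p) % m * r % m = r ^ (m + (p + 1)) % m := by
        rw [Nat.mod_mul_mod, ← pow_succ]
        ring_nf
      rw [hstep]
      have := ih (p + 1) (d - 1) (by omega)
        (by have e : m + (p + 1) + (d - 1) = m + p + d := by omega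
            rw [e]; exact hsucc)
      exact ⟨by omega, by omega, this.2.2⟩

lemma pvPeriod_spec (r m : Nat) (hm : 1 ≤ m) :
    1 ≤ pvPeriod r m ∧ pvPeriod r m ≤ m ∧
      r ^ (m + pvPeriod r m) % m = r ^ m % m := by
  obtain ⟨p0, hp1, hpm, hp⟩ := exists_period r m hm
  have hx : (r ^ m % m) * r % m = r ^ (m + 1) % m := by
    rw [Nat.mod_mul_mod, ← pow_succ]
  have := periodGo_finds r m (r ^ m % m) m 1 (p0 - 1) (by omega)
    (by have e : m + 1 + (p0 - 1) = m + p0 := by omega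
        rw [e]; exact hp)
  have hdef : pvPeriod r m = pvPeriodGo r m (r ^ m % m) ((r ^ m % m) * r % m) 1 m := by
    unfold pvPeriod; rw [pyPowMod_eq]
  rw [← hx] at this
  rw [hdef]
  exact ⟨this.1, by omega, this.2.2⟩

-- a verified period propagates: tails beyond m fold down mod p
lemma pow_period_reduce (r m p : Nat) (hp : 1 ≤ p)
    (h : r ^ (m + p) % m = r ^ m % m) :
    ∀ c, r ^ (m + c) % m = r ^ (m + c % p) % m := by
  intro c
  induction c using Nat.strong_induction_on with
  | _ c ih =>
    rcases Nat.lt_or_ge c p with hc | hc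
    · rw [Nat.mod_eq_of_lt hc]
    · have h1 : r ^ (m + c) % m = r ^ (m + (c - p)) % m := by
        have := pow_mod_shift r m (m + p) m (c - p) h
        have e1 : m + p + (c - p) = m + c := by omega
        rw [e1] at this; exact this
      rw [h1, ih (c - p) (by omega), Nat.mod_eq_sub_mod hc]

-- index juggling: the exponent Source B rebuilds is (T - m) mod p
lemma mod_shift_eq (T m p : Nat) (hp : 1 ≤ p) (hmT : m ≤ T) :
    (T % p + p - m % p) % p = (T - m) % p := by
  have h1 : m % p + p * (m / p) = m := Nat.mod_add_div m p
  have h3 : m % p < p := Nat.mod_lt _ (by omega)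
  have : ((T % p + p - m % p) + m) % p = ((T - m) + m) % p := by
    rw [Nat.sub_add_cancel hmT]
    have e : T % p + p - m % p + m = T % p + p + p * (m / p) := by omega
    rw [e]
    have hTp : T % p < p := Nat.mod_lt _ (by omega)
    simp [Nat.add_mul_mod_self_left, Nat.add_mod_right]
  exact Nat.ModEq.add_right_cancel' m this

-- main invariant of peel: it computes the tower mod m
lemma pvPeel_eq (ls : List Nat) : ∀ m, 1 ≤ m → m ≤ pvCAP →
    pvPeel ls m = pvTower ls % m := by
  induction ls with
  | nil =>
    intro m hm _
    by_cases h1 : m = 1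
    · simp [pvPeel, pvTower, h1]
    · simp [pvPeel, pvTower, h1]
  | cons r tl ih =>
    intro m hm hmCAP
    by_cases h1 : m = 1
    · simp [pvPeel, h1, Nat.mod_one]
    · rw [pvPeel, if_neg h1]
      set T := pvTower tl with hT
      by_cases he : pvCapT tl < pvCAP
      · rw [if_pos he]
        have : pvCapT tl = T := by
          have := pvCapT_eq tl
          rw [← hT] at this
          omega
        rw [this, pyPowMod_eq]; rfl
      · rw [if_neg he]
        have hTcap : pvCAP ≤ T := by
          have := pvCapT_eq tl
          rw [← hT] at this
          omega
        have hmT : m ≤ T := le_trans hmCAP hTcap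
        obtain ⟨hp1, hpm, hper⟩ := pvPeriod_spec r m hm
        set p := pvPeriod r m with hpdef
        have hrec : pvPeel tl p = T % p := ih p hp1 (le_trans hpm hmCAP)
        show pyPowMod r (m + (pvPeel tl p + p - m % p) % p) m = r ^ T % m
        rw [pyPowMod_eq, hrec, mod_shift_eq T m p hp1 hmT]
        have := (pow_period_reduce r m p hp1 hper (T - m)).symm
        have e : m + (T - m) = T := by omega
        rw [e] at this
        exact this

-- A's Int fold is the Nat fold over the residues
lemma foldl_int_eq_nat (B : Int) (hB : 0 < B) (A : List Int) :
    ∀ t : Nat,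
      A.foldl (fun ans num => pyPow (PySem.Int.mod num B) ans.toNat) (t : Int)
        = ((A.map (fun a => (PySem.Int.mod a B).toNat)).foldl (fun t r => r ^ t) t : Nat) := by
  simp only [pyPow_eq]
  induction A with
  | nil => intro t; simp
  | cons a A ih =>
    intro t
    simp only [List.foldl_cons, List.map_cons]
    have hnn : 0 ≤ PySem.Int.mod a B := PySem.Int.mod_nonneg a hB
    have h1 : PySem.Int.mod a B = ((PySem.Int.mod a B).toNat : Int) :=
      (Int.toNat_of_nonneg hnn).symm
    rw [Int.toNat_natCast]
    have h2 : (PySem.Int.mod a B) ^ t = (((PySem.Int.mod a B).toNat ^ t : Nat) : Int) := by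
      rw [h1, Int.toNat_natCast]; push_cast; ring
    rw [h2, ih]

-- A's left fold is the tower of the reversed residue list
lemma tower_reverse_foldl (l : List Nat) :
    pvTower l.reverse = l.foldl (fun t r => r ^ t) 1 := by
  have h : ∀ l' : List Nat, pvTower l' = l'.foldr (fun r t => r ^ t) 1 := by
    intro l'; induction l' with
    | nil => rfl
    | cons r tl ih => simp [pvTower, ih]
  rw [h, List.foldr_reverse]

-- ===== VERDICT (by name: the statement is the Claim_ definition above) =====
theorem solve_spec : Claim_equal_solve := by
  intro A B hDom hPre
  have hB : 0 < B := hPre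
  have hBdom : B ≤ 2147483648 := by
    unfold Dom_solve at hDom
    simp only [Bool.and_eq_true, pvDomInt, decide_eq_true_eq] at hDom
    exact hDom.2.2
  set rsN := A.map (fun a => (PySem.Int.mod a B).toNat) with hrs
  set b := B.toNat with hb
  have hb1 : 1 ≤ b := by omega
  have hbCAP : b ≤ pvCAP := by
    have : b ≤ 2147483648 := by omega
    norm_num [pvCAP]; omega
  have hBb : B = (b : Int) := by omega
  show solve A B = solve_alt A B
  unfold solve solve_alt
  rw [if_neg (by omega : ¬ B ≤ 0)]
  have h1 : A.foldl (fun ans num => pyPow (PySem.Int.mod num B) ans.toNat) 1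
      = ((rsN.foldl (fun t r => r ^ t) 1 : Nat) : Int) := by
    have := foldl_int_eq_nat B hB A 1
    simpa using this
  rw [h1]
  rw [pvPeel_eq rsN.reverse b hb1 hbCAP, tower_reverse_foldl rsN]
  rw [hBb, PySem.Int.mod_natCast]
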